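-- pv_equiv track=rewrite | github.com/sidearrow/competitive-programing | codes/atcoder/abc192/c.py | solve
-- ===== SOURCE A (Python) =====
-- def solve(n: int):
--     n = str(n)
--     tmp = [0] * 10
--     for a in n:
--         tmp[int(a)] += 1
--     mn = ""
--     for i, v in enumerate(tmp):
--         mn += str(i) * v
--     mx = "".join(list(reversed(mn)))
--     res = int(mx) - int(mn)
--     return res
-- ===== SOURCE B (Python) =====
-- def solve(n: int):
--     digits = sorted(int(c) for c in str(n))
--     mn = ''.join(map(str, digits))
--     mx = ''.join(map(str, reversed(digits)))
--     return int(mx) - int(mn)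
-- ===== Notes on version B (the rewrite author's own statement) =====
-- stated objective: simpler
-- what changed: Replaces the size-10 counting table and the 0..9 bucket-expansion loop with a single comparison sort of the digit list, joining it forwards for the minimum and backwards for the maximum.
import Mathlib
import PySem

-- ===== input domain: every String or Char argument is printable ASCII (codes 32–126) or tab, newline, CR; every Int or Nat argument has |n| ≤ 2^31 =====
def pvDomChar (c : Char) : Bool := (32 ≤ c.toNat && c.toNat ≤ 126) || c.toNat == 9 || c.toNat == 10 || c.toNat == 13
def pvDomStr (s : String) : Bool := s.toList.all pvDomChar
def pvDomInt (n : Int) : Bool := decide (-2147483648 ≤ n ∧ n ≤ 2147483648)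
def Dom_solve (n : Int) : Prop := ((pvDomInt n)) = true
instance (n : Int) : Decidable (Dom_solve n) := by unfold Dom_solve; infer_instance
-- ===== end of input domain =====

-- B replaces A's counting table + bucket-expansion loop by one comparison sort of the digit list (simpler decomposition, same result).

-- ===== PORT A =====
-- int(a) for a single character a; the 0 default is never reached under Pre_ (every char of str(n) is a digit for n ≥ 0)
def pvParse (c : Char) : Int := (PySem.Int.ofChars? [c]).getD 0

def solve (n : Int) : Int :=
  let s := PySem.Int.toChars n
  let tmp := s.foldl (fun t a =>
    PySem.List.pySetD t (pvParse a) (PySem.List.pyGetD t (pvParse a) 0 + 1)) (List.replicate 10 (0 : Int))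
  let mn := (PySem.List.enumerate tmp).foldl (fun acc iv =>
    acc ++ PySem.List.pyRepeat (PySem.Int.toChars iv.1) iv.2) ([] : List Char)
  let mx := mn.reverse
  (PySem.Int.ofChars? mx).getD 0 - (PySem.Int.ofChars? mn).getD 0

-- ===== PORT B =====
def solve_alt (n : Int) : Int :=
  let digits := PySem.List.sorted ((PySem.Int.toChars n).map pvParse) (fun x => x) false
  let mn := PySem.Chars.join [] (digits.map PySem.Int.toChars)
  let mx := PySem.Chars.join [] (digits.reverse.map PySem.Int.toChars)
  (PySem.Int.ofChars? mx).getD 0 - (PySem.Int.ofChars? mn).getD 0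

-- ===== PRECONDITION & SPEC =====
-- A raises ValueError on negative n (int('-') on the sign character of str(n)); Pre_ keeps exactly the inputs where A returns.
def Pre_solve (n : Int) : Prop := 0 ≤ n
instance (n : Int) : Decidable (Pre_solve n) := by unfold Pre_solve; infer_instance
def pvWitness_solve : Int := 3021

def Spec_solve (n : Int) (out : Int) : Prop := out = solve_alt n
instance (n : Int) (out : Int) : Decidable (Spec_solve n out) := by unfold Spec_solve; infer_instance

-- ===== CLAIM (what is proved, stated in full; the proofs are below) =====
def Claim_equal_solve : Prop := ∀ (n : Int), Dom_solve n → Pre_solve n → Spec_solve n (solve n)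

-- ===== LEMMAS AND PROOFS =====

-- the ten decimal digit characters; every character of str(n) for n ≥ 0 is one of them
def pvDigits : List Char := ['0','1','2','3','4','5','6','7','8','9']

-- the single character of str(d) for a one-digit d
def pvChr (x : Int) : Char := (PySem.Int.toChars x).headI

theorem pv_digitChar_mem (k : Nat) (h : k < 10) : Nat.digitChar k ∈ pvDigits := by
  interval_cases k <;> decide

theorem pv_mem_toDigitsCore (f : Nat) : ∀ (n : Nat) (l : List Char),
    (∀ x ∈ l, x ∈ pvDigits) → ∀ c ∈ Nat.toDigitsCore 10 f n l, c ∈ pvDigits := by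
  induction f with
  | zero => intro n l hl c hc; simp [Nat.toDigitsCore] at hc; exact hl c hc
  | succ f ih =>
    intro n l hl c hc
    simp only [Nat.toDigitsCore] at hc
    split at hc
    · rcases List.mem_cons.mp hc with h | h
      · subst h; exact pv_digitChar_mem _ (Nat.mod_lt _ (by norm_num))
      · exact hl c h
    · exact ih _ _ (by
        intro x hx
        rcases List.mem_cons.mp hx with h | h
        · subst h; exact pv_digitChar_mem _ (Nat.mod_lt _ (by norm_num))
        · exact hl x h) c hc

theorem pv_mem_toChars (n : Int) (h : 0 ≤ n) : ∀ c ∈ PySem.Int.toChars n, c ∈ pvDigits := by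
  intro c hc
  simp only [PySem.Int.toChars, if_neg (by omega : ¬ n < 0)] at hc
  exact pv_mem_toDigitsCore _ _ [] (by simp) c hc

theorem pv_parse_props (c : Char) (h : c ∈ pvDigits) :
    0 ≤ pvParse c ∧ pvParse c < 10 ∧ PySem.Int.toChars (pvParse c) = [c] := by
  fin_cases h <;> exact ⟨by decide, by decide, by decide⟩

theorem pv_map_range_getD (t : List Int) : (List.range t.length).map (fun i => t.getD i 0) = t := by
  apply List.ext_getElem (by simp)
  intro i h1 h2
  simp [List.getD_eq_getElem?_getD, List.getElem?_eq_getElem h2]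

-- A's counting loop: the table holds the digit multiplicities of the processed characters
theorem pv_foldTmp (s : List Char) : ∀ (t : List Int), t.length = 10 →
    (∀ c ∈ s, c ∈ pvDigits) →
    s.foldl (fun t a => PySem.List.pySetD t (pvParse a) (PySem.List.pyGetD t (pvParse a) 0 + 1)) t
      = (List.range 10).map (fun i => t.getD i 0 + ((s.map pvParse).count (i : Int))) := by
  induction s with
  | nil =>
    intro t ht _
    simp only [List.foldl_nil, List.map_nil, List.count_nil, Nat.cast_zero, add_zero]
    rw [← ht, pv_map_range_getD]
  | cons a s ih =>
    intro t ht hs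
    obtain ⟨h0, h10, -⟩ := pv_parse_props a (hs a List.mem_cons_self)
    have hlt : (pvParse a) < (t.length : Int) := by omega
    have hset : PySem.List.pySetD t (pvParse a) (PySem.List.pyGetD t (pvParse a) 0 + 1)
        = t.set (pvParse a).toNat (t.getD (pvParse a).toNat 0 + 1) := by
      rw [PySem.List.pyGetD_of_nonneg _ _ h0]
      simp [PySem.List.pySetD, PySem.List.pySet?, PySem.List.pyIdx?, if_pos h0, if_pos hlt]
    rw [List.foldl_cons, hset, ih _ (by simp [ht]) (fun c hc => hs c (List.mem_cons_of_mem _ hc))]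
    apply List.map_congr_left
    intro i hi
    have hi10 : i < 10 := List.mem_range.mp hi
    by_cases hip : pvParse a = (i : Int)
    · have hn : (pvParse a).toNat = i := by omega
      rw [hn]
      rw [List.getD_eq_getElem?_getD, List.getElem?_set_self (by omega)]
      simp [hip, List.getD_eq_getElem?_getD,
        List.getElem?_eq_getElem (by omega : i < t.length)]
      ring
    · have hne : (pvParse a).toNat ≠ i := by omega
      rw [List.getD_eq_getElem?_getD, List.getElem?_set_ne hne]
      simp [hip, List.getD_eq_getElem?_getD]

-- B's comparison sort of a list of one-digit values IS the counting-sort expansion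
theorem pv_countsort (ds : List Int) (h : ∀ x ∈ ds, 0 ≤ x ∧ x < 10) :
    PySem.List.sorted ds (fun x => x) false
      = ([0,1,2,3,4,5,6,7,8,9] : List Int).flatMap (fun i => List.replicate (ds.count i) i) := by
  apply PySem.List.sorted_id_eq_of_perm_of_pairwise
  · apply List.perm_iff_count.mpr
    intro v
    simp only [List.flatMap_cons, List.flatMap_nil, List.append_nil, List.count_append,
      List.count_replicate]
    by_cases hv : 0 ≤ v ∧ v < 10
    · obtain ⟨h0, h10⟩ := hv
      interval_cases v <;> norm_num
    · have hz : ds.count v = 0 := List.count_eq_zero.mpr (fun hm => hv ⟨(h v hm).1, (h v hm).2⟩)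
      rw [hz]
      simp only [beq_iff_eq]
      rw [if_neg (by omega : ¬((0:Int) = v)), if_neg (by omega : ¬((1:Int) = v)),
        if_neg (by omega : ¬((2:Int) = v)), if_neg (by omega : ¬((3:Int) = v)),
        if_neg (by omega : ¬((4:Int) = v)), if_neg (by omega : ¬((5:Int) = v)),
        if_neg (by omega : ¬((6:Int) = v)), if_neg (by omega : ¬((7:Int) = v)),
        if_neg (by omega : ¬((8:Int) = v)), if_neg (by omega : ¬((9:Int) = v))]
  · simp only [List.flatMap_cons, List.flatMap_nil, List.append_nil, List.pairwise_append,
      List.pairwise_replicate, List.mem_replicate, List.mem_append]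
    norm_num
    and_intros <;> (intros; omega)

-- ''.join over one-character pieces is just the list of those characters
theorem pv_join_map (l : List Int) (h : ∀ x ∈ l, ∃ c, PySem.Int.toChars x = [c]) :
    PySem.Chars.join [] (l.map PySem.Int.toChars) = l.map pvChr := by
  have hm : l.map PySem.Int.toChars = (l.map pvChr).map (fun c => [c]) := by
    rw [List.map_map]
    apply List.map_congr_left
    intro x hx
    obtain ⟨c, hc⟩ := h x hx
    simp [pvChr, hc, Function.comp]
  rw [hm, PySem.Chars.join_nil_singletons]

-- ===== VERDICT (by name: the statement is the Claim_ definition above) =====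
theorem solve_spec : Claim_equal_solve := by
  intro n _ hPre
  unfold Spec_solve
  simp only [solve, solve_alt]
  have hdig : ∀ c ∈ PySem.Int.toChars n, c ∈ pvDigits := pv_mem_toChars n hPre
  have hds : ∀ x ∈ (PySem.Int.toChars n).map pvParse, 0 ≤ x ∧ x < 10 := by
    intro x hx
    obtain ⟨c, hc, rfl⟩ := List.mem_map.mp hx
    exact ⟨(pv_parse_props c (hdig c hc)).1, (pv_parse_props c (hdig c hc)).2.1⟩
  have hsing : ∀ x ∈ PySem.List.sorted ((PySem.Int.toChars n).map pvParse) (fun x => x) false,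
      ∃ c, PySem.Int.toChars x = [c] := by
    intro x hx
    have hx' : x ∈ (PySem.Int.toChars n).map pvParse := (PySem.List.mem_sorted _ _ _ _).mp hx
    obtain ⟨c, hc, rfl⟩ := List.mem_map.mp hx'
    exact ⟨c, (pv_parse_props c (hdig c hc)).2.2⟩
  have hsingr : ∀ x ∈ (PySem.List.sorted ((PySem.Int.toChars n).map pvParse) (fun x => x) false).reverse,
      ∃ c, PySem.Int.toChars x = [c] := fun x hx => hsing x (List.mem_reverse.mp hx)
  rw [pv_foldTmp _ _ (by simp) hdig, pv_join_map _ hsing, pv_join_map _ hsingr,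
    List.map_reverse, pv_countsort _ hds]
  have hr : List.range 10 = [0,1,2,3,4,5,6,7,8,9] := rfl
  rw [hr]
  simp only [List.map_cons, List.map_nil, PySem.List.enumerate_cons, List.foldl_cons,
    List.flatMap_cons, List.flatMap_nil, List.append_nil, List.map_append,
    List.map_replicate]
  have t0 : PySem.Int.toChars 0 = ['0'] := rfl
  have t1 : PySem.Int.toChars 1 = ['1'] := rfl
  have t2 : PySem.Int.toChars 2 = ['2'] := rfl
  have t3 : PySem.Int.toChars 3 = ['3'] := rfl
  have t4 : PySem.Int.toChars 4 = ['4'] := rfl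
  have t5 : PySem.Int.toChars 5 = ['5'] := rfl
  have t6 : PySem.Int.toChars 6 = ['6'] := rfl
  have t7 : PySem.Int.toChars 7 = ['7'] := rfl
  have t8 : PySem.Int.toChars 8 = ['8'] := rfl
  have t9 : PySem.Int.toChars 9 = ['9'] := rfl
  norm_num [List.getD, pvChr, PySem.List.pyRepeat_singleton, PySem.List.enumerate,
    t0, t1, t2, t3, t4, t5, t6, t7, t8, t9, Int.toNat_natCast, List.reverse_replicate,
    List.headI, List.append_assoc]
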